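-- pv_equiv track=rewrite | github.com/zyxw59/soundchanger | gmp/gmp_latex.py | make_cline
-- ===== SOURCE A (Python) =====
-- def make_cline(segments):
--     out = []
--     nl = True
--     for i, s in enumerate(segments):
--         if nl:
--             if s:
--                 out.append([i + 1])
--                 nl = False
--         else:
--             if not s:
--                 out[-1].append(i)
--                 nl = True
--     if not nl:
--         out[-1].append(i + 1)
--     return ''.join(r'\cmidrule{{{0[0]}-{0[1]}}}'.format(l) for l in out)
-- ===== SOURCE B (Python) =====
-- def make_cline(segments):
--     parts = []
--     i = 0
--     n = len(segments)
--     while i < n: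
--         if segments[i]:
--             j = i
--             while j < n and segments[j]:
--                 j += 1
--             parts.append('\\cmidrule{%d-%d}' % (i + 1, j))
--             i = j
--         else:
--             i += 1
--     return ''.join(parts)
-- ===== Notes on version B (the rewrite author's own statement) =====
-- stated objective: simpler
-- what changed: Replaced A's boolean-flag state machine that appends to and mutates nested lists (plus a post-loop patch of the last run) with a direct two-pointer scan that finds each maximal nonzero run and formats it immediately; no nested lists, no flag, no post-loop fixup.
import Mathlib
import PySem

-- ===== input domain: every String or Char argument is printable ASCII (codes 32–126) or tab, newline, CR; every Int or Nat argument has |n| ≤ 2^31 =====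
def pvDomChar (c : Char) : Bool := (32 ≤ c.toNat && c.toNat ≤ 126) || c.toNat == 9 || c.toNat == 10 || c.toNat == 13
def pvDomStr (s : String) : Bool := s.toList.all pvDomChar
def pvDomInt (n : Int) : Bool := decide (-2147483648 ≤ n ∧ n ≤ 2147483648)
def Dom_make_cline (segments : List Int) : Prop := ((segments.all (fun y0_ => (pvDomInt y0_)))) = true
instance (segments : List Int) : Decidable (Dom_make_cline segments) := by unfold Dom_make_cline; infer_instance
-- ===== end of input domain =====

-- B replaces A's flag state machine with nested-list mutation by a direct two-pointer
-- scan over maximal nonzero runs (objective: simpler; same O(n) cost).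


-- ===== PORT A =====
-- out[-1].append(x): append x to the last inner list (out is never empty when called)
def pvAppendLast : List (List Int) → Int → List (List Int)
  | [], _ => []
  | [l], x => [l ++ [x]]
  | l :: l' :: rest, x => l :: pvAppendLast (l' :: rest) x

-- r'\cmidrule{{{0[0]}-{0[1]}}}'.format(l)  (l always has exactly two elements here)
def pvFmtA (l : List Int) : String :=
  "\\cmidrule{" ++ PySem.Int.toStr (l.getD 0 0) ++ "-" ++ PySem.Int.toStr (l.getD 1 0) ++ "}"

-- the for-loop over enumerate(segments): state (out, nl), i the running index
def pvLoopA : List Int → Nat → List (List Int) × Bool → List (List Int) × Bool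
  | [], _, st => st
  | s :: rest, i, (out, nl) =>
      pvLoopA rest (i + 1)
        (if nl then (if s ≠ 0 then (out ++ [[(i : Int) + 1]], false) else (out, nl))
         else (if s = 0 then (pvAppendLast out (i : Int), true) else (out, nl)))

def make_cline (segments : List Int) : String :=
  let st := pvLoopA segments 0 ([], true)
  -- if not nl: out[-1].append(i + 1)  (i + 1 = len(segments) here)
  let out := if st.2 then st.1 else pvAppendLast st.1 (Int.ofNat segments.length)
  PySem.Str.join "" (out.map pvFmtA)

-- ===== PORT B =====
-- inner while: advance j past the nonzero run, returning (j, remaining list)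
def pvTakeRun : List Int → Nat → Nat × List Int
  | [], j => (j, [])
  | s :: rest, j => if s ≠ 0 then pvTakeRun rest (j + 1) else (j, s :: rest)

theorem pvTakeRun_len : ∀ (xs : List Int) (j : Nat), (pvTakeRun xs j).2.length ≤ xs.length
  | [], _ => le_refl _
  | s :: rest, j => by
      simp only [pvTakeRun]
      split
      · exact le_trans (pvTakeRun_len rest (j + 1)) (Nat.le_succ _)
      · simp

-- outer while loop of Source B, collecting the parts list
def pvGoB : List Int → Nat → List String
  | [], _ => []
  | s :: rest, i =>
      if s ≠ 0 then
        let r := pvTakeRun (s :: rest) i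
        ("\\cmidrule{" ++ PySem.Int.toStr ((i : Int) + 1) ++ "-" ++ PySem.Int.toStr (Int.ofNat r.1) ++ "}")
          :: pvGoB r.2 r.1
      else pvGoB rest (i + 1)
  termination_by xs _ => xs.length
  decreasing_by
    · simp only [pvTakeRun, if_pos ‹_›]
      exact Nat.lt_succ_of_le (pvTakeRun_len rest (i + 1))
    · simp

def make_cline_alt (segments : List Int) : String :=
  PySem.Str.join "" (pvGoB segments 0)

-- ===== PRECONDITION & SPEC =====
def Spec_make_cline (segments : List Int) (out : String) : Prop := out = make_cline_alt segments
instance (segments : List Int) (out : String) : Decidable (Spec_make_cline segments out) := by unfold Spec_make_cline; infer_instance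

-- ===== CLAIM (what is proved, stated in full; the proofs are below) =====
def Claim_equal_make_cline : Prop := ∀ (segments : List Int), Dom_make_cline segments → Spec_make_cline segments (make_cline segments)

-- ===== LEMMAS AND PROOFS =====

-- "finish" A's computation from an arbitrary loop state
def pvFinishA (xs : List Int) (i : Nat) (st : List (List Int) × Bool) : String :=
  let st' := pvLoopA xs i st
  let out := if st'.2 then st'.1 else pvAppendLast st'.1 (Int.ofNat (i + xs.length))
  PySem.Str.join "" (out.map pvFmtA)

theorem str_eq_of_toList {a b : String} (h : a.toList = b.toList) : a = b := by
  rw [← String.ofList_toList (s := a), h, String.ofList_toList]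

theorem make_cline_eq_finish (segments : List Int) :
    make_cline segments = pvFinishA segments 0 ([], true) := by
  simp [make_cline, pvFinishA]

theorem chars_join_nil (ls : List (List Char)) : PySem.Chars.join [] ls = ls.flatten := by
  induction ls with
  | nil => simp [PySem.Chars.join_nil]
  | cons p rest ih =>
      cases rest with
      | nil => simp [PySem.Chars.join_singleton]
      | cons q rs => simp [PySem.Chars.join_cons_cons] at ih ⊢; simp [ih]

theorem join_append (a b : List String) :
    PySem.Str.join "" (a ++ b) = PySem.Str.join "" a ++ PySem.Str.join "" b := by
  simp [PySem.Str.join, chars_join_nil]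

theorem join_cons (x : String) (l : List String) :
    PySem.Str.join "" (x :: l) = x ++ PySem.Str.join "" l := by
  simp [PySem.Str.join, chars_join_nil]

theorem appendLast_append (out : List (List Int)) (a x : Int) :
    pvAppendLast (out ++ [[a]]) x = out ++ [[a, x]] := by
  induction out with
  | nil => simp [pvAppendLast]
  | cons l ls ih =>
      cases ls with
      | nil => simp [pvAppendLast]
      | cons l' ls' => simpa [pvAppendLast] using ih

theorem stepT0 (s : Int) (rest : List Int) (i : Nat) (out : List (List Int)) (hs : s = 0) :
    pvFinishA (s :: rest) i (out, true) = pvFinishA rest (i + 1) (out, true) := by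
  have h : i + (s :: rest).length = i + 1 + rest.length := by simp; omega
  simp only [pvFinishA, pvLoopA, hs, List.length_cons]
  norm_num
  ring_nf

theorem stepT1 (s : Int) (rest : List Int) (i : Nat) (out : List (List Int)) (hs : s ≠ 0) :
    pvFinishA (s :: rest) i (out, true) =
      pvFinishA rest (i + 1) (out ++ [[(i : Int) + 1]], false) := by
  have h : i + (s :: rest).length = i + 1 + rest.length := by simp; omega
  simp only [pvFinishA, pvLoopA, hs, List.length_cons]
  norm_num
  ring_nf
  simp [hs]

theorem stepF0 (s : Int) (rest : List Int) (i : Nat) (out : List (List Int)) (hs : s = 0) :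
    pvFinishA (s :: rest) i (out, false) =
      pvFinishA rest (i + 1) (pvAppendLast out (i : Int), true) := by
  have h : i + (s :: rest).length = i + 1 + rest.length := by simp; omega
  simp only [pvFinishA, pvLoopA, hs, List.length_cons]
  norm_num
  ring_nf

theorem stepF1 (s : Int) (rest : List Int) (i : Nat) (out : List (List Int)) (hs : s ≠ 0) :
    pvFinishA (s :: rest) i (out, false) = pvFinishA rest (i + 1) (out, false) := by
  have h : i + (s :: rest).length = i + 1 + rest.length := by simp; omega
  simp only [pvFinishA, pvLoopA, hs, List.length_cons]
  norm_num
  ring_nf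

-- joint invariant: from state (out, true) the rest of A equals B's remaining runs;
-- from state (out ++ [[a]], false) the open run is closed at the end found by pvTakeRun
theorem key : ∀ (xs : List Int),
    (∀ (i : Nat) (out : List (List Int)),
      pvFinishA xs i (out, true) =
        PySem.Str.join "" (out.map pvFmtA) ++ PySem.Str.join "" (pvGoB xs i)) ∧
    (∀ (i : Nat) (out : List (List Int)) (a : Int),
      pvFinishA xs i (out ++ [[a]], false) =
        PySem.Str.join "" (out.map pvFmtA) ++
          pvFmtA [a, Int.ofNat (pvTakeRun xs i).1] ++
          PySem.Str.join "" (pvGoB (pvTakeRun xs i).2 (pvTakeRun xs i).1)) := by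
  intro xs
  induction xs with
  | nil =>
      constructor
      · intro i out
        simp [pvFinishA, pvLoopA, pvGoB, PySem.Str.join, chars_join_nil]
      · intro i out a
        simp only [pvFinishA, pvLoopA, pvTakeRun, pvGoB, appendLast_append,
          List.length_nil, Nat.add_zero, Bool.false_eq_true, if_false, List.map_append]
        rw [join_append]
        apply str_eq_of_toList
        simp [PySem.Str.join, chars_join_nil, pvFmtA, PySem.Int.toStr]
  | cons s rest ih =>
      obtain ⟨ihT, ihF⟩ := ih
      constructor
      · intro i out
        by_cases hs : s = 0
        · rw [stepT0 s rest i out hs, ihT (i + 1) out]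
          simp [pvGoB, hs]
        · rw [stepT1 s rest i out hs, ihF (i + 1) out ((i : Int) + 1)]
          simp only [pvGoB, hs, ne_eq, not_false_eq_true, if_pos, pvTakeRun]
          rw [join_cons]
          apply str_eq_of_toList
          simp [pvFmtA, PySem.Int.toStr]
        -- run continues / closes depending on the head element
      · intro i out a
        by_cases hs : s = 0
        · rw [stepF0 s rest i (out ++ [[a]]) hs, appendLast_append,
            ihT (i + 1) (out ++ [[a, (i : Int)]])]
          simp only [pvTakeRun, hs, ne_eq, not_true_eq_false, if_false,
            List.map_append]
          rw [join_append]
          simp only [pvGoB, ne_eq, not_true_eq_false, if_false]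
          apply str_eq_of_toList
          simp [PySem.Str.join, chars_join_nil, pvFmtA, PySem.Int.toStr]
        · rw [stepF1 s rest i (out ++ [[a]]) hs, ihF (i + 1) out a]
          simp only [pvTakeRun, hs, ne_eq, not_false_eq_true, if_pos]

-- ===== VERDICT (by name: the statement is the Claim_ definition above) =====
theorem make_cline_spec : Claim_equal_make_cline := by
  intro segments _
  unfold Spec_make_cline make_cline_alt
  rw [make_cline_eq_finish, (key segments).1 0 []]
  simp [PySem.Str.join, chars_join_nil]
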